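-- pv_equiv track=rewrite | github.com/yjp8842/Algorithm_STUDY | 프로그래머스/2/87390. n＾2 배열 자르기/n＾2 배열 자르기.py | solution
-- ===== SOURCE A (Python) =====
-- def solution(n, left, right):
--     answer = []
--
--     # left부터 right까지 하나씩 순회하면서
--     for idx in range(left, right + 1):
--         i = idx // n  # 몇 번째 행인지
--         j = idx % n   # 몇 번째 열인지
--
--         value = max(i + 1, j + 1)
--         answer.append(value)
--
--     return answer
-- ===== SOURCE B (Python) =====
-- def solution(n, left, right):
--     # Row-wise: within row i, value is (i+1) for columns j <= i and (j+1) for j > i,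
--     # so each row's slice is a constant block followed by a consecutive run.
--     if right < left:
--         return []
--     r0, c0 = divmod(left, n)
--     r1, c1 = divmod(right, n)
--     answer = []
--     for i in range(r0, r1 + 1):
--         cstart = c0 if i == r0 else 0
--         cend = c1 if i == r1 else n - 1
--         k = min(cend, i)  # last column in this span whose value is i+1
--         if k >= cstart:
--             answer += [i + 1] * (k - cstart + 1)
--         jstart = max(cstart, i + 1)
--         answer += range(jstart + 1, cend + 2)
--     return answer
-- ===== Notes on version B (the rewrite author's own statement) =====
-- stated objective: faster
-- what changed: Instead of computing max(idx//n+1, idx%n+1) per index, B loops over the touched rows only and emits each row's slice as one constant block [i+1]*len plus one consecutive run range(jstart+1, cend+2), removing all per-element divmod/max work.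
-- outside the precondition, e.g. on solution(-2, 0, 3): A returns [1, 0, 1, 0], B returns []
import Mathlib
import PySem

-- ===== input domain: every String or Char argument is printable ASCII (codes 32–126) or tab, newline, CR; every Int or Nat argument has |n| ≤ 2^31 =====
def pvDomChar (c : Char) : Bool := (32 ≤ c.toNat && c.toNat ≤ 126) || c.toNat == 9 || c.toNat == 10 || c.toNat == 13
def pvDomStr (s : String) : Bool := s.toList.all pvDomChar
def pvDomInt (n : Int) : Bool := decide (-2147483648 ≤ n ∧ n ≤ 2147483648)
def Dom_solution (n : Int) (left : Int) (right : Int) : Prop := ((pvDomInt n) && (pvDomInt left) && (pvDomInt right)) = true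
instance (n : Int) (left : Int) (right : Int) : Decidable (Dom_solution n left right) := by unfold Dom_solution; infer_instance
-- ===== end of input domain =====

-- B replaces the per-index max(idx//n+1, idx%n+1) loop by a row-wise loop that emits each
-- row's slice as one constant block plus one consecutive run (objective: faster, constant factor).

-- ===== PORT A =====
def solution (n : Int) (left : Int) (right : Int) : List Int :=
  (PySem.List.pyRange left (right + 1) 1).foldl
    (fun answer idx =>
      let i := PySem.Int.floordiv idx n
      let j := PySem.Int.mod idx n
      let value := max (i + 1) (j + 1)
      answer ++ [value]) []

-- ===== PORT B =====
def solution_alt (n : Int) (left : Int) (right : Int) : List Int :=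
  if right < left then []
  else
    let r0 := PySem.Int.floordiv left n
    let c0 := PySem.Int.mod left n
    let r1 := PySem.Int.floordiv right n
    let c1 := PySem.Int.mod right n
    (PySem.List.pyRange r0 (r1 + 1) 1).foldl
      (fun answer i =>
        let cstart := if i = r0 then c0 else 0
        let cend := if i = r1 then c1 else n - 1
        let k := min cend i
        let answer :=
          if k ≥ cstart then answer ++ List.replicate (k - cstart + 1).toNat (i + 1) else answer
        let jstart := max cstart (i + 1)
        answer ++ PySem.List.pyRange (jstart + 1) (cend + 2) 1) []

-- ===== PRECONDITION & SPEC =====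
-- Pre_ excludes n ≤ 0: n = 0 makes A raise ZeroDivisionError, and n < 0 lies outside the
-- function's natural domain (it reads an n×n array, so n ≥ 1); left/right are unrestricted.
def Pre_solution (n : Int) (left : Int) (right : Int) : Prop := 1 ≤ n
instance (n : Int) (left : Int) (right : Int) : Decidable (Pre_solution n left right) := by
  unfold Pre_solution; infer_instance

def pvWitness_solution : Int × Int × Int := (3, 2, 5)

def Spec_solution (n : Int) (left : Int) (right : Int) (out : List Int) : Prop :=
  out = solution_alt n left right
instance (n : Int) (left : Int) (right : Int) (out : List Int) : Decidable (Spec_solution n left right out) := by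
  unfold Spec_solution; infer_instance

-- ===== CLAIM (what is proved, stated in full; the proofs are below) =====
def Claim_equal_solution : Prop := ∀ (n : Int) (left : Int) (right : Int),
  Dom_solution n left right → Pre_solution n left right →
  Spec_solution n left right (solution n left right)

-- ===== LEMMAS AND PROOFS =====

-- the per-index value A computes
def fA (n idx : Int) : Int :=
  max (PySem.Int.floordiv idx n + 1) (PySem.Int.mod idx n + 1)

-- the chunk B appends for row i
def seg (n r0 c0 r1 c1 i : Int) : List Int :=
  let cs := if i = r0 then c0 else 0
  let ce := if i = r1 then c1 else n - 1
  (if min ce i ≥ cs then List.replicate (min ce i - cs + 1).toNat (i + 1) else []) ++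
    PySem.List.pyRange (max cs (i + 1) + 1) (ce + 2) 1

lemma divmod_row (n i c : Int) (hn : 1 ≤ n) (hc0 : 0 ≤ c) (hcn : c < n) :
    PySem.Int.floordiv (i * n + c) n = i ∧ PySem.Int.mod (i * n + c) n = c := by
  have hd : PySem.Int.floordiv (i * n + c) n = i := by
    rw [PySem.Int.floordiv_eq_iff_of_pos (by omega)]
    constructor <;> nlinarith
  refine ⟨hd, ?_⟩
  have h := PySem.Int.floordiv_mul_add_mod (i * n + c) n
  rw [hd] at h; linarith

lemma constBlock (n i : Int) (hn : 1 ≤ n) : ∀ (m : Nat) (cs : Int), 0 ≤ cs →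
    cs + m ≤ i + 1 → cs + m ≤ n →
    (PySem.List.pyRange (i * n + cs) (i * n + cs + m) 1).map (fA n) =
      List.replicate m (i + 1) := by
  intro m
  induction m with
  | zero =>
    intro cs _ _ _
    rw [show i * n + cs + ((0:Nat):Int) = i * n + cs by simp]
    simp [PySem.List.pyRange_one_eq_nil (le_refl (i * n + cs))]
  | succ m ih =>
    intro cs h0 hi hnn
    have hcast : ((m + 1 : Nat) : Int) = (m : Int) + 1 := by push_cast; ring
    rw [hcast] at hi hnn ⊢
    rw [PySem.List.pyRange_one_cons (by omega)]
    have hdm := divmod_row n i cs hn h0 (by omega)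
    have hhead : fA n (i * n + cs) = i + 1 := by
      simp [fA, hdm.1, hdm.2]; omega
    have htail : i * n + cs + 1 = i * n + (cs + 1) := by ring
    have hend : i * n + cs + ((m : Int) + 1) = i * n + (cs + 1) + m := by ring
    rw [List.map_cons, hhead, hend, htail, ih (cs + 1) (by omega) (by omega) (by omega)]
    rfl

lemma runBlock (n i : Int) (hn : 1 ≤ n) : ∀ (m : Nat) (p : Int), 0 ≤ p → i + 1 ≤ p →
    p + m ≤ n →
    (PySem.List.pyRange (i * n + p) (i * n + p + m) 1).map (fA n) =
      PySem.List.pyRange (p + 1) (p + 1 + m) 1 := by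
  intro m
  induction m with
  | zero =>
    intro p _ _ _
    rw [show i * n + p + ((0:Nat):Int) = i * n + p by simp,
        show p + 1 + ((0:Nat):Int) = p + 1 by simp]
    rw [PySem.List.pyRange_one_eq_nil (le_refl (i * n + p)),
        PySem.List.pyRange_one_eq_nil (le_refl (p + 1))]
    rfl
  | succ m ih =>
    intro p h0 hip hnn
    have hcast : ((m + 1 : Nat) : Int) = (m : Int) + 1 := by push_cast; ring
    rw [hcast] at hnn ⊢
    rw [PySem.List.pyRange_one_cons (by omega),
        PySem.List.pyRange_one_cons (by omega : p + 1 < p + 1 + ((m : Int) + 1))]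
    have hdm := divmod_row n i p hn h0 (by omega)
    have hhead : fA n (i * n + p) = p + 1 := by
      simp [fA, hdm.1, hdm.2]; omega
    have hend : i * n + p + ((m : Int) + 1) = i * n + (p + 1) + m := by ring
    have htail : i * n + p + 1 = i * n + (p + 1) := by ring
    have hend2 : p + 1 + ((m : Int) + 1) = (p + 1) + 1 + m := by ring
    rw [List.map_cons, hhead, hend, htail, hend2, ih (p + 1) (by omega) (by omega) (by omega)]

lemma rowEq (n i cs ce : Int) (hn : 1 ≤ n) (h0 : 0 ≤ cs) (hle : cs ≤ ce) (hce : ce < n) :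
    (PySem.List.pyRange (i * n + cs) (i * n + ce + 1) 1).map (fA n) =
      (if min ce i ≥ cs then List.replicate (min ce i - cs + 1).toNat (i + 1) else []) ++
        PySem.List.pyRange (max cs (i + 1) + 1) (ce + 2) 1 := by
  by_cases hics : i < cs
  · -- no constant part: every column exceeds i
    have hmin : ¬ min ce i ≥ cs := by omega
    have hmax : max cs (i + 1) = cs := by omega
    rw [if_neg hmin, hmax, List.nil_append]
    have hm : i * n + ce + 1 = i * n + cs + ((ce + 1 - cs).toNat : Int) := by omega
    have hm2 : ce + 2 = cs + 1 + ((ce + 1 - cs).toNat : Int) := by omega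
    rw [hm, hm2]
    exact runBlock n i hn _ cs h0 (by omega) (by omega)
  · have hics : cs ≤ i := by omega
    by_cases hcei : ce ≤ i
    · -- all constant: every column ≤ i
      have hmin : min ce i = ce := by omega
      rw [if_pos (by omega), hmin]
      have htail : PySem.List.pyRange (max cs (i + 1) + 1) (ce + 2) 1 = [] :=
        PySem.List.pyRange_one_eq_nil (by omega)
      rw [htail, List.append_nil]
      have hm : i * n + ce + 1 = i * n + cs + ((ce - cs + 1).toNat : Int) := by omega
      rw [hm]
      exact constBlock n i hn _ cs h0 (by omega) (by omega)
    · have hcei : i < ce := by omega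
      -- split at column i+1
      have hmin : min ce i = i := by omega
      have hmax : max cs (i + 1) = i + 1 := by omega
      rw [if_pos (by omega), hmin, hmax]
      rw [PySem.List.pyRange_one_append (i * n + cs) (i * n + (i + 1)) (i * n + ce + 1)
            (by omega) (by nlinarith), List.map_append]
      have h1 : i * n + (i + 1) = i * n + cs + ((i + 1 - cs).toNat : Int) := by omega
      have h2 : (PySem.List.pyRange (i * n + cs) (i * n + (i + 1)) 1).map (fA n) =
          List.replicate (i - cs + 1).toNat (i + 1) := by
        rw [h1]
        have := constBlock n i hn (i + 1 - cs).toNat cs h0 (by omega) (by omega)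
        rw [this]
        congr 1; omega
      have h3 : (PySem.List.pyRange (i * n + (i + 1)) (i * n + ce + 1) 1).map (fA n) =
          PySem.List.pyRange (i + 1 + 1) (ce + 2) 1 := by
        have hm : i * n + ce + 1 = i * n + (i + 1) + ((ce - i).toNat : Int) := by omega
        have hm2 : ce + 2 = (i + 1) + 1 + ((ce - i).toNat : Int) := by omega
        rw [hm, hm2]
        exact runBlock n i hn _ (i + 1) (by omega) (by omega) (by omega)
      rw [h2, h3]

lemma rowsAux (n : Int) (hn : 1 ≤ n) : ∀ (k : Nat) (r0 c0 r1 c1 : Int),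
    0 ≤ c0 → c0 < n → 0 ≤ c1 → c1 < n → (r0 < r1 ∨ (r0 = r1 ∧ c0 ≤ c1)) →
    (r1 - r0).toNat = k →
    (PySem.List.pyRange (r0 * n + c0) (r1 * n + c1 + 1) 1).map (fA n) =
      (PySem.List.pyRange r0 (r1 + 1) 1).flatMap (seg n r0 c0 r1 c1) := by
  intro k
  induction k with
  | zero =>
    intro r0 c0 r1 c1 h00 h0n h10 h1n hsh hk
    have heq : r0 = r1 := by cases hsh with | inl h => omega | inr h => exact h.1
    have hcc : c0 ≤ c1 := by cases hsh with | inl h => omega | inr h => exact h.2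
    subst heq
    rw [PySem.List.pyRange_one_singleton, List.flatMap_cons, List.flatMap_nil,
        List.append_nil]
    have hseg : seg n r0 c0 r0 c1 r0 =
        (if min c1 r0 ≥ c0 then List.replicate (min c1 r0 - c0 + 1).toNat (r0 + 1) else []) ++
          PySem.List.pyRange (max c0 (r0 + 1) + 1) (c1 + 2) 1 := by
      simp [seg]
    rw [hseg]
    exact rowEq n r0 c0 c1 hn h00 hcc h1n
  | succ k ih =>
    intro r0 c0 r1 c1 h00 h0n h10 h1n hsh hk
    have hlt : r0 < r1 := by cases hsh with | inl h => exact h | inr h => omega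
    have hmn : (r0 + 1) * n ≤ r1 * n :=
      mul_le_mul_of_nonneg_right (by omega) (by omega)
    have e1 : (r0 + 1) * n = r0 * n + n := by ring
    -- split the index range at the start of the next row
    rw [PySem.List.pyRange_one_append (r0 * n + c0) ((r0 + 1) * n) (r1 * n + c1 + 1)
          (by linarith) (by linarith), List.map_append]
    -- first chunk is the full tail of row r0
    have hfirst : (PySem.List.pyRange (r0 * n + c0) ((r0 + 1) * n) 1).map (fA n) =
        seg n r0 c0 r1 c1 r0 := by
      have hend : (r0 + 1) * n = r0 * n + (n - 1) + 1 := by ring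
      rw [hend, rowEq n r0 c0 (n - 1) hn h00 (by omega) (by omega)]
      have hne : ¬ r0 = r1 := by omega
      simp [seg, hne]
    -- second chunk: induction hypothesis on the remaining rows
    have e2 : (r0 + 1) * n + 0 = (r0 + 1) * n := by ring
    have hih := ih (r0 + 1) 0 r1 c1 le_rfl (by omega) h10 h1n (by omega) (by omega)
    rw [e2] at hih
    rw [hih, hfirst]
    -- fold the two flatMaps together
    rw [PySem.List.pyRange_one_cons (by omega : r0 < r1 + 1), List.flatMap_cons]
    congr 1
    apply List.flatMap_congr
    intro i hi
    have hmem := (PySem.List.mem_pyRange_one).1 hi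
    have hne0 : ¬ i = r0 := by omega
    simp [seg, hne0, ite_self]

lemma rowsEq (n l r : Int) (hn : 1 ≤ n) (hlr : l ≤ r) :
    (PySem.List.pyRange l (r + 1) 1).map (fA n) =
      (PySem.List.pyRange (PySem.Int.floordiv l n) (PySem.Int.floordiv r n + 1) 1).flatMap
        (seg n (PySem.Int.floordiv l n) (PySem.Int.mod l n)
               (PySem.Int.floordiv r n) (PySem.Int.mod r n)) := by
  have hl := PySem.Int.floordiv_mul_add_mod l n
  have hr := PySem.Int.floordiv_mul_add_mod r n
  have h00 : 0 ≤ PySem.Int.mod l n := PySem.Int.mod_nonneg l (by omega)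
  have h0n : PySem.Int.mod l n < n := PySem.Int.mod_lt l (by omega)
  have h10 : 0 ≤ PySem.Int.mod r n := PySem.Int.mod_nonneg r (by omega)
  have h1n : PySem.Int.mod r n < n := PySem.Int.mod_lt r (by omega)
  have hmono : PySem.Int.floordiv l n ≤ PySem.Int.floordiv r n := by
    rw [PySem.Int.floordiv_eq_ediv_of_pos (by omega),
        PySem.Int.floordiv_eq_ediv_of_pos (by omega)]
    exact Int.ediv_le_ediv (by omega) hlr
  have hsh : PySem.Int.floordiv l n < PySem.Int.floordiv r n ∨
      (PySem.Int.floordiv l n = PySem.Int.floordiv r n ∧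
        PySem.Int.mod l n ≤ PySem.Int.mod r n) := by
    rcases lt_or_eq_of_le hmono with h | h
    · exact Or.inl h
    · refine Or.inr ⟨h, ?_⟩
      have : PySem.Int.floordiv l n * n = PySem.Int.floordiv r n * n := by rw [h]
      omega
  have h := rowsAux n hn (PySem.Int.floordiv r n - PySem.Int.floordiv l n).toNat
    (PySem.Int.floordiv l n) (PySem.Int.mod l n)
    (PySem.Int.floordiv r n) (PySem.Int.mod r n) h00 h0n h10 h1n hsh rfl
  rw [show PySem.Int.floordiv l n * n + PySem.Int.mod l n = l by omega,
      show PySem.Int.floordiv r n * n + PySem.Int.mod r n = r by omega] at h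
  exact h

lemma solutionA_map (n l r : Int) :
    solution n l r = (PySem.List.pyRange l (r + 1) 1).map (fA n) := by
  unfold solution
  rw [show (fun (answer : List Int) idx =>
        let i := PySem.Int.floordiv idx n
        let j := PySem.Int.mod idx n
        let value := max (i + 1) (j + 1)
        answer ++ [value]) = fun answer idx => answer ++ [fA n idx] from rfl]
  rw [PySem.List.foldl_append_singleton_eq_map, List.nil_append]

lemma solutionB_flatMap (n l r : Int) (h : ¬ r < l) :
    solution_alt n l r =
      (PySem.List.pyRange (PySem.Int.floordiv l n) (PySem.Int.floordiv r n + 1) 1).flatMap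
        (seg n (PySem.Int.floordiv l n) (PySem.Int.mod l n)
               (PySem.Int.floordiv r n) (PySem.Int.mod r n)) := by
  simp only [solution_alt, if_neg h]
  have hb : (fun (answer : List Int) i =>
      let cstart := if i = PySem.Int.floordiv l n then PySem.Int.mod l n else 0
      let cend := if i = PySem.Int.floordiv r n then PySem.Int.mod r n else n - 1
      let k := min cend i
      let answer :=
        if k ≥ cstart then answer ++ List.replicate (k - cstart + 1).toNat (i + 1) else answer
      let jstart := max cstart (i + 1)
      answer ++ PySem.List.pyRange (jstart + 1) (cend + 2) 1) =
      fun answer i => answer ++ seg n (PySem.Int.floordiv l n) (PySem.Int.mod l n)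
               (PySem.Int.floordiv r n) (PySem.Int.mod r n) i := by
    funext answer i
    simp only [seg]
    split_ifs <;> simp [List.append_assoc]
  rw [hb, PySem.List.foldl_append_eq_flatMap, List.nil_append]

-- ===== VERDICT (by name: the statement is the Claim_ definition above) =====
theorem solution_spec : Claim_equal_solution := by
  intro n l r _ hpre
  unfold Spec_solution
  have hn : 1 ≤ n := hpre
  by_cases hlr : r < l
  · unfold solution solution_alt
    rw [if_pos hlr, PySem.List.pyRange_one_eq_nil (by omega)]
    rfl
  · rw [solutionA_map, solutionB_flatMap n l r hlr]
    exact rowsEq n l r hn (by omega)
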